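-- pv_equiv track=rewrite | github.com/Rijulmehta531/DSA_Problems | Amazon-asked/GetMinRemovals.py | getMinRemovals
-- ===== SOURCE A (Python) =====
-- from typing import List
--
-- def getMinRemovals(data: List[int], max_distinct: int) -> int:
--   count = {}
--   res = 0
--   arr = [[] for i in range(len(data)+1)]
--   for d in data:
--     count[d] = count.get(d,0) + 1
--   if len(count) == max_distinct:
--     return 0
--
--   for key, value in count.items():
--     arr[value].append(key)
--
--   l = 1
--   while len(count) > max_distinct and l < len(arr):
--     for n in arr[l]:
--       if len(count) > max_distinct:
--         del count[n]
--         res+=l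
--     l+=1
--   return res
-- ===== SOURCE B (Python) =====
-- def getMinRemovals(data, max_distinct):
--   count = {}
--   for d in data:
--     count[d] = count.get(d, 0) + 1
--   num_remove = len(count) - max_distinct
--   if num_remove <= 0:
--     return 0
--   return sum(sorted(count.values())[:num_remove])
-- ===== Notes on version B (the rewrite author's own statement) =====
-- stated objective: simpler
-- what changed: Replaces A's bucket array indexed by frequency and its guarded nested while/for removal loop with a single comparison sort of the frequency values and a slice-sum of the smallest num_remove of them.
import Mathlib
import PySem

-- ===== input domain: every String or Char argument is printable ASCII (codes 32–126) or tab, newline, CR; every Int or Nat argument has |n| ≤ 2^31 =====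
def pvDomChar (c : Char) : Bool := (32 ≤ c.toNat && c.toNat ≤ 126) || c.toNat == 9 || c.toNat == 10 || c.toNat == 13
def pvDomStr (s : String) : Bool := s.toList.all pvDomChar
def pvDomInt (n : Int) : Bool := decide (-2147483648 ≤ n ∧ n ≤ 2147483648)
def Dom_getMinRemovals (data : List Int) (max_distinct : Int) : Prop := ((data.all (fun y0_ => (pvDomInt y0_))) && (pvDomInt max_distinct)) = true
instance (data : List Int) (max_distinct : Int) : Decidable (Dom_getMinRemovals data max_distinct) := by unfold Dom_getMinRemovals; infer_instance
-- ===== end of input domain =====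

-- B replaces A's frequency-indexed bucket array and guarded nested removal loop by
-- sorting the frequency values and summing the smallest num_remove of them (simpler).


-- ===== PORT A =====
-- inner 'for n in arr[l]: if len(count) > max_distinct: del count[n]; res += l'
def gmrInner (md l : Int) : List Int → PySem.Dict Int Int × Int → PySem.Dict Int Int × Int
  | [], st => st
  | n :: ns, (c, r) =>
      if (c.size : Int) > md then gmrInner md l ns (c.erase n, r + l)
      else gmrInner md l ns (c, r)

-- 'l = 1; while len(count) > max_distinct and l < len(arr): …; l += 1' — the index l
-- walks 1 .. len(arr)-1, i.e. structural recursion over the buckets arr[1:], carrying l.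
def gmrOuter (md : Int) : List (List Int) → Int → PySem.Dict Int Int × Int → Int
  | [], _, (_, r) => r
  | b :: bs, l, (c, r) =>
      if (c.size : Int) > md then gmrOuter md bs (l + 1) (gmrInner md l b (c, r))
      else r

def getMinRemovals (data : List Int) (max_distinct : Int) : Int :=
  let count : PySem.Dict Int Int :=
    data.foldl (fun d x => d.insert x (d.getD x 0 + 1)) PySem.Dict.empty
  let arr : List (List Int) := (List.range (data.length + 1)).map (fun _ => ([] : List Int))
  if (count.size : Int) = max_distinct then 0
  else
    -- for key, value in count.items(): arr[value].append(key)   (value is always in range)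
    let arr := count.items.foldl (fun a p => a.modify p.2.toNat (· ++ [p.1])) arr
    gmrOuter max_distinct (arr.drop 1) 1 (count, 0)

-- ===== PORT B =====
def getMinRemovals_alt (data : List Int) (max_distinct : Int) : Int :=
  let count : PySem.Dict Int Int :=
    data.foldl (fun d x => d.insert x (d.getD x 0 + 1)) PySem.Dict.empty
  let num_remove : Int := (count.size : Int) - max_distinct
  if num_remove ≤ 0 then 0
  else (PySem.List.slice (PySem.List.sorted count.values (fun x => x) false) none (some num_remove)).sum

-- ===== PRECONDITION & SPEC =====
def Spec_getMinRemovals (data : List Int) (max_distinct : Int) (out : Int) : Prop := out = getMinRemovals_alt data max_distinct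
instance (data : List Int) (max_distinct : Int) (out : Int) : Decidable (Spec_getMinRemovals data max_distinct out) := by unfold Spec_getMinRemovals; infer_instance

-- ===== CLAIM (what is proved, stated in full; the proofs are below) =====
def Claim_equal_getMinRemovals : Prop := ∀ (data : List Int) (max_distinct : Int), Dom_getMinRemovals data max_distinct → Spec_getMinRemovals data max_distinct (getMinRemovals data max_distinct)

-- ===== LEMMAS AND PROOFS =====

-- Pure shadow of gmrInner: only the dict SIZE matters (keys processed are distinct and present).
def pureIn (md l : Int) : Nat → Nat × Int → Nat × Int
  | 0, st => st
  | k + 1, (s, r) => if (s : Int) > md then pureIn md l k (s - 1, r + l) else pureIn md l k (s, r)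

def pureOut (md : Int) : List Nat → Int → Nat × Int → Int
  | [], _, (_, r) => r
  | k :: ks, l, (s, r) =>
      if (s : Int) > md then pureOut md ks (l + 1) (pureIn md l k (s, r)) else r

-- the weight list: bucket lengths ks starting at level l, flattened as replicate k l chunks
def flatWeights : List Nat → Int → List Int
  | [], _ => []
  | k :: ks, l => List.replicate k l ++ flatWeights ks (l + 1)

theorem pureIn_spec (md l : Int) (k : Nat) : ∀ (s : Nat) (r : Int), k ≤ s →
    pureIn md l k (s, r) =
      (s - min k ((s : Int) - md).toNat, r + l * ((min k ((s : Int) - md).toNat : Nat) : Int)) := by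
  induction k with
  | zero => intro s r _; simp [pureIn]
  | succ k ih =>
    intro s r hk
    by_cases h : (s : Int) > md
    · rw [pureIn, if_pos h, ih (s - 1) (r + l) (by omega)]
      have hb : min (k + 1) ((s : Int) - md).toNat = min k (((s - 1 : Nat) : Int) - md).toNat + 1 := by
        omega
      rw [Prod.mk.injEq]
      refine ⟨by omega, ?_⟩
      rw [hb]
      push_cast
      ring
    · rw [pureIn, if_neg h, ih s r (by omega)]
      have hb : min (k + 1) ((s : Int) - md).toNat = min k ((s : Int) - md).toNat := by omega
      rw [hb]

theorem pureOut_stop (md : Int) (ks : List Nat) (l : Int) (s : Nat) (r : Int)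
    (h : ¬ (s : Int) > md) : pureOut md ks l (s, r) = r := by
  cases ks <;> simp [pureOut, h]

theorem length_flatWeights (ks : List Nat) (l : Int) : (flatWeights ks l).length = ks.sum := by
  induction ks generalizing l with
  | nil => simp [flatWeights]
  | cons k ks ih => simp [flatWeights, ih]

theorem flatWeights_sorted (ks : List Nat) (l : Int) :
    (flatWeights ks l).Pairwise (· ≤ ·) ∧ ∀ x ∈ flatWeights ks l, l ≤ x := by
  induction ks generalizing l with
  | nil => simp [flatWeights]
  | cons k ks ih =>
    obtain ⟨ihp, ihm⟩ := ih (l + 1)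
    constructor
    · rw [flatWeights, List.pairwise_append]
      refine ⟨List.pairwise_replicate.2 (Or.inr le_rfl), ihp, ?_⟩
      intro x hx y hy
      rw [List.eq_of_mem_replicate hx]
      have := ihm y hy
      omega
    · intro x hx
      rw [flatWeights, List.mem_append] at hx
      rcases hx with hx | hx
      · rw [List.eq_of_mem_replicate hx]
      · have := ihm x hx; omega

theorem pureOut_spec (md : Int) (ks : List Nat) : ∀ (l : Int) (s : Nat) (r : Int), s = ks.sum →
    pureOut md ks l (s, r) = r + ((flatWeights ks l).take ((s : Int) - md).toNat).sum := by
  induction ks with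
  | nil => intro l s r hs; simp [pureOut, flatWeights]
  | cons k ks ih =>
    intro l s r hs
    have hs' : s = k + ks.sum := by simpa using hs
    by_cases h : (s : Int) > md
    · rw [pureOut, if_pos h, pureIn_spec md l k s r (by omega)]
      by_cases hkle : k ≤ ((s : Int) - md).toNat
      · have hmin : min k ((s : Int) - md).toNat = k := by omega
        rw [hmin, ih (l + 1) (s - k) (r + l * k) (by omega)]
        rw [flatWeights, List.take_append,
          List.take_of_length_le (show (List.replicate k l).length ≤ ((s : Int) - md).toNat by
            simpa using hkle),
          List.sum_append, List.sum_replicate_int]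
        have hcast : (((s - k : Nat) : Int) - md).toNat = ((s : Int) - md).toNat - (List.replicate k l).length := by
          simp; omega
        rw [hcast]
        ring
      · have hmin : min k ((s : Int) - md).toNat = ((s : Int) - md).toNat := by omega
        rw [hmin, pureOut_stop md ks (l + 1) _ _ (by omega)]
        rw [flatWeights, List.take_append_of_le_length (by simp; omega),
          List.take_replicate]
        have hmin2 : min ((s : Int) - md).toNat k = ((s : Int) - md).toNat := by omega
        rw [hmin2, List.sum_replicate_int]
        ring
    · rw [pureOut, if_neg h]
      have h0 : ((s : Int) - md).toNat = 0 := by omega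
      simp [h0]

-- dict facts
theorem keys_erase (d : PySem.Dict Int Int) (n : Int) :
    (d.erase n).keys = d.keys.filter (fun k => !(k == n)) := by
  obtain ⟨items⟩ := d
  simp only [PySem.Dict.erase, PySem.Dict.keys]
  induction items with
  | nil => rfl
  | cons p ps ih =>
    by_cases h : p.1 == n
    · simp [h, ih]
    · simp only [List.filter_cons, List.map_cons, h]
      simp [ih]

theorem filter_ne_length (n : Int) : ∀ ks : List Int, ks.Nodup → n ∈ ks →
    (ks.filter (fun k => !(k == n))).length = ks.length - 1 := by
  intro ks hnd hn
  induction ks with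
  | nil => simp at hn
  | cons k ks ih =>
    rw [List.nodup_cons] at hnd
    rcases List.mem_cons.1 hn with h | h
    · subst h
      rw [List.filter_cons_of_neg (by simp), List.filter_eq_self.2 (by
        intro a ha; simp; intro he; exact hnd.1 (he ▸ ha))]
      simp
    · have hne : (k == n) = false := by
        simp; intro he; exact hnd.1 (he ▸ h)
      rw [List.filter_cons_of_pos (by simp [hne])]
      have := ih hnd.2 h
      have hlen : 1 ≤ ks.length := List.length_pos_of_mem h
      simp only [List.length_cons, this]
      omega

theorem size_erase (d : PySem.Dict Int Int) (n : Int) (hnd : d.keys.Nodup) (hn : n ∈ d.keys) :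
    (d.erase n).size = d.size - 1 := by
  have hkeys : (d.erase n).keys.length = d.keys.length - 1 := by
    rw [keys_erase]
    exact filter_ne_length n d.keys hnd hn
  simpa [PySem.Dict.keys, PySem.Dict.size] using hkeys

theorem gmrInner_abs (md l : Int) (b : List Int) : ∀ (c : PySem.Dict Int Int) (r : Int),
    c.keys.Nodup → b.Nodup → (∀ n ∈ b, n ∈ c.keys) →
    (gmrInner md l b (c, r)).2 = (pureIn md l b.length (c.size, r)).2 ∧
    (gmrInner md l b (c, r)).1.size = (pureIn md l b.length (c.size, r)).1 ∧
    (gmrInner md l b (c, r)).1.keys.Nodup ∧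
    (∀ n ∈ c.keys, n ∉ b → n ∈ (gmrInner md l b (c, r)).1.keys) := by
  induction b with
  | nil =>
    intro c r hnd _ _
    exact ⟨rfl, rfl, hnd, fun n hn _ => hn⟩
  | cons n ns ih =>
    intro c r hnd hb hmem
    rw [List.nodup_cons] at hb
    have hnk : n ∈ c.keys := hmem n List.mem_cons_self
    by_cases h : (c.size : Int) > md
    · have hek : (c.erase n).keys = c.keys.filter (fun k => !(k == n)) := keys_erase c n
      have hes : (c.erase n).size = c.size - 1 := size_erase c n hnd hnk
      have hend : (c.erase n).keys.Nodup := hek ▸ hnd.filter _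
      have hemem : ∀ m ∈ ns, m ∈ (c.erase n).keys := by
        intro m hm
        rw [hek, List.mem_filter]
        exact ⟨hmem m (List.mem_cons_of_mem n hm), by simp; intro he; exact hb.1 (he ▸ hm)⟩
      obtain ⟨ih1, ih2, ih3, ih4⟩ := ih (c.erase n) (r + l) hend hb.2 hemem
      refine ⟨?_, ?_, ?_, ?_⟩
      · rw [gmrInner, if_pos h, ih1, hes, List.length_cons, pureIn, if_pos h]
      · rw [gmrInner, if_pos h, ih2, hes, List.length_cons, pureIn, if_pos h]
      · rw [gmrInner, if_pos h]; exact ih3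
      · intro m hm hmn
        rw [gmrInner, if_pos h]
        exact ih4 m (by
          rw [hek, List.mem_filter]
          refine ⟨hm, by simp; intro he; exact hmn (he ▸ List.mem_cons_self)⟩)
          (fun hx => hmn (List.mem_cons_of_mem n hx))
    · obtain ⟨ih1, ih2, ih3, ih4⟩ := ih c r hnd hb.2 (fun m hm => hmem m (List.mem_cons_of_mem n hm))
      refine ⟨?_, ?_, ?_, ?_⟩
      · rw [gmrInner, if_neg h, ih1, List.length_cons, pureIn, if_neg h]
      · rw [gmrInner, if_neg h, ih2, List.length_cons, pureIn, if_neg h]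
      · rw [gmrInner, if_neg h]; exact ih3
      · intro m hm hmn
        rw [gmrInner, if_neg h]
        exact ih4 m hm (fun hx => hmn (List.mem_cons_of_mem n hx))

theorem gmrOuter_abs (md : Int) (bs : List (List Int)) : ∀ (l : Int) (c : PySem.Dict Int Int) (r : Int),
    c.keys.Nodup → bs.flatten.Nodup → (∀ n ∈ bs.flatten, n ∈ c.keys) →
    gmrOuter md bs l (c, r) = pureOut md (bs.map List.length) l (c.size, r) := by
  induction bs with
  | nil => intro l c r _ _ _; simp [gmrOuter, pureOut]
  | cons b bs ih =>
    intro l c r hnd hfl hmem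
    rw [List.flatten_cons, List.nodup_append] at hfl
    obtain ⟨hbnd, hbsnd, hdisj⟩ := hfl
    by_cases h : (c.size : Int) > md
    · rw [gmrOuter, if_pos h, List.map_cons, pureOut, if_pos h]
      obtain ⟨h1, h2, h3, h4⟩ := gmrInner_abs md l b c r hnd hbnd
        (fun n hn => hmem n (by simp [hn]))
      have heta : gmrInner md l b (c, r) = ((gmrInner md l b (c, r)).1, (gmrInner md l b (c, r)).2) := rfl
      have heta2 : pureIn md l b.length (c.size, r) =
          ((pureIn md l b.length (c.size, r)).1, (pureIn md l b.length (c.size, r)).2) := rfl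
      rw [heta, heta2, ← h1, ← h2]
      exact ih (l + 1) (gmrInner md l b (c, r)).1 (gmrInner md l b (c, r)).2 h3 hbsnd
        (fun n hn => h4 n (hmem n (by simp [hn])) (fun hx => hdisj n hx n hn rfl))
    · rw [gmrOuter, if_neg h, List.map_cons, pureOut, if_neg h]

-- bucket-array facts
theorem flatten_set_perm (bl : List (List Int)) : ∀ (j : Nat) (hj : j < bl.length) (k : Int),
    ((bl.set j (bl[j] ++ [k])).flatten).Perm (k :: bl.flatten) := by
  induction bl with
  | nil => intro j hj k; simp at hj
  | cons x bl ih =>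
    intro j hj k
    cases j with
    | zero =>
      simp only [List.set_cons_zero, List.getElem_cons_zero, List.flatten_cons, List.append_assoc,
        List.singleton_append]
      exact List.perm_middle
    | succ j =>
      simp only [List.set_cons_succ, List.getElem_cons_succ, List.flatten_cons]
      exact ((ih j (by simpa using hj) k).append_left x).trans List.perm_middle

theorem flatWeights_set_perm (ns : List Nat) : ∀ (j : Nat) (hj : j < ns.length) (l : Int),
    (flatWeights (ns.set j (ns[j] + 1)) l).Perm ((l + j) :: flatWeights ns l) := by
  induction ns with
  | nil => intro j hj l; simp at hj
  | cons m ns ih =>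
    intro j hj l
    cases j with
    | zero =>
      simp only [List.set_cons_zero, List.getElem_cons_zero, flatWeights, List.replicate_succ,
        List.cons_append, Nat.cast_zero, add_zero]
      exact List.Perm.refl _
    | succ j =>
      simp only [List.set_cons_succ, List.getElem_cons_succ, flatWeights]
      have hstep : (l + 1 + (j : Int)) = l + ((j + 1 : Nat) : Int) := by push_cast; ring
      exact (((ih j (by simpa using hj) (l + 1)).append_left _).trans List.perm_middle).trans
        (by rw [hstep])

theorem buckets_abs (ps : List (Int × Int)) : ∀ (t : List (List Int)),
    (∀ p ∈ ps, 1 ≤ p.2 ∧ p.2.toNat ≤ t.length) →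
    ((ps.foldl (fun a p => a.modify (p.2.toNat - 1) (· ++ [p.1])) t).flatten).Perm
      (t.flatten ++ ps.map Prod.fst) ∧
    (flatWeights ((ps.foldl (fun a p => a.modify (p.2.toNat - 1) (· ++ [p.1])) t).map List.length) 1).Perm
      (flatWeights (t.map List.length) 1 ++ ps.map Prod.snd) ∧
    (ps.foldl (fun a p => a.modify (p.2.toNat - 1) (· ++ [p.1])) t).length = t.length := by
  induction ps with
  | nil => intro t _; exact ⟨by simp, by simp, rfl⟩
  | cons p ps ih =>
    intro t hps
    obtain ⟨hp1, hp2⟩ := hps p List.mem_cons_self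
    have hj : p.2.toNat - 1 < t.length := by omega
    have hmod : t.modify (p.2.toNat - 1) (· ++ [p.1]) =
        t.set (p.2.toNat - 1) (t[p.2.toNat - 1] ++ [p.1]) := by
      rw [List.modify_eq_set_get _ hj]; rfl
    have hlen : (t.modify (p.2.toNat - 1) (· ++ [p.1])).length = t.length := by
      rw [hmod, List.length_set]
    obtain ⟨ih1, ih2, ih3⟩ := ih (t.modify (p.2.toNat - 1) (· ++ [p.1]))
      (fun q hq => ⟨(hps q (List.mem_cons_of_mem p hq)).1,
        hlen ▸ (hps q (List.mem_cons_of_mem p hq)).2⟩)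
    rw [List.foldl_cons]
    have hmap : (t.modify (p.2.toNat - 1) (· ++ [p.1])).map List.length =
        (t.map List.length).set (p.2.toNat - 1) ((t.map List.length)[p.2.toNat - 1]'(by simpa using hj) + 1) := by
      rw [hmod, List.map_set]
      congr 1
      simp
    have hflat : ((t.modify (p.2.toNat - 1) (· ++ [p.1])).flatten).Perm (p.1 :: t.flatten) := by
      rw [hmod]; exact flatten_set_perm t (p.2.toNat - 1) hj p.1
    have hwts : (flatWeights ((t.modify (p.2.toNat - 1) (· ++ [p.1])).map List.length) 1).Perm
        (p.2 :: flatWeights (t.map List.length) 1) := by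
      rw [hmap]
      have := flatWeights_set_perm (t.map List.length) (p.2.toNat - 1) (by simpa using hj) 1
      have hcast : ((1 : Int) + ((p.2.toNat - 1 : Nat) : Int)) = p.2 := by omega
      rw [hcast] at this
      exact this
    refine ⟨?_, ?_, by rw [ih3, hlen]⟩
    · exact ih1.trans ((hflat.append_right _).trans List.perm_middle.symm)
    · exact ih2.trans ((hwts.append_right _).trans List.perm_middle.symm)

theorem fold_cons (ps : List (Int × Int)) : ∀ (h : List Int) (t : List (List Int)),
    (∀ p ∈ ps, 1 ≤ p.2) →
    ps.foldl (fun a p => a.modify p.2.toNat (· ++ [p.1])) (h :: t) =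
      h :: ps.foldl (fun a p => a.modify (p.2.toNat - 1) (· ++ [p.1])) t := by
  induction ps with
  | nil => intro h t _; rfl
  | cons p ps ih =>
    intro h t hps
    have hv : p.2.toNat = (p.2.toNat - 1) + 1 := by
      have := (hps p List.mem_cons_self)
      omega
    rw [List.foldl_cons, List.foldl_cons, hv, List.modify_succ_cons]
    exact ih h _ (fun q hq => hps q (List.mem_cons_of_mem p hq))

theorem flatWeights_replicate_zero (n : Nat) (l : Int) :
    flatWeights (List.replicate n 0) l = [] := by
  induction n generalizing l with
  | zero => rfl
  | succ n ih => simp [List.replicate_succ, flatWeights, ih]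

-- ===== VERDICT (by name: the statement is the Claim_ definition above) =====
theorem getMinRemovals_spec : Claim_equal_getMinRemovals := by
  unfold Claim_equal_getMinRemovals
  intro data md _
  simp only [Spec_getMinRemovals, getMinRemovals, getMinRemovals_alt,
    PySem.Dict.foldl_insert_getD_add_one_eq_counter]
  set C := PySem.Dict.counter data with hC
  set n := data.length with hn
  have hps : ∀ p ∈ C.items, 1 ≤ p.2 ∧ p.2.toNat ≤ n := by
    rw [hC, PySem.Dict.items_counter]
    intro p hp
    obtain ⟨k, hk, rfl⟩ := List.mem_map.1 hp
    have hkm : k ∈ data := (PySem.Set.mem_ofList data k).1 hk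
    have h1 : 0 < List.count k data := List.count_pos_iff.2 hkm
    have h2 : List.count k data ≤ n := List.count_le_length
    exact ⟨by simp; omega, by simp; omega⟩
  have harr0 : (List.range (n + 1)).map (fun _ => ([] : List Int)) =
      [] :: List.replicate n ([] : List Int) := by
    rw [List.map_const']
    simp [List.replicate_succ]
  have hfold : C.items.foldl (fun a p => a.modify p.2.toNat (· ++ [p.1])) ([] :: List.replicate n ([] : List Int)) =
      [] :: C.items.foldl (fun a p => a.modify (p.2.toNat - 1) (· ++ [p.1])) (List.replicate n ([] : List Int)) :=
    fold_cons C.items [] (List.replicate n []) (fun p hp => (hps p hp).1)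
  set T := C.items.foldl (fun a p => a.modify (p.2.toNat - 1) (· ++ [p.1])) (List.replicate n ([] : List Int)) with hT
  obtain ⟨hfl, hwt, hlen⟩ := buckets_abs C.items (List.replicate n [])
    (fun p hp => ⟨(hps p hp).1, by simpa using (hps p hp).2⟩)
  rw [← hT] at hfl hwt
  have hfl' : T.flatten.Perm C.keys := by
    have : C.keys = C.items.map Prod.fst := rfl
    rw [this]
    simpa using hfl
  have hwt' : (flatWeights (T.map List.length) 1).Perm C.values := by
    have : C.values = C.items.map Prod.snd := rfl
    rw [this]
    simpa [flatWeights_replicate_zero] using hwt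
  have hknd : C.keys.Nodup := PySem.Dict.nodup_keys_counter data
  have houter : gmrOuter md (([] :: T).drop 1) 1 (C, 0) =
      pureOut md (T.map List.length) 1 (C.size, 0) := by
    rw [List.drop_one, List.tail_cons]
    exact gmrOuter_abs md T 1 C 0 hknd (hfl'.nodup_iff.2 hknd) (fun x hx => hfl'.mem_iff.1 hx)
  have hsum : C.size = (T.map List.length).sum := by
    have h1 := length_flatWeights (T.map List.length) 1
    have h2 := hwt'.length_eq
    have h3 : C.values.length = C.size := by
      simp [PySem.Dict.values, PySem.Dict.size]
    omega
  have hsortedeq : PySem.List.sorted C.values (fun x => x) = flatWeights (T.map List.length) 1 :=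
    PySem.List.sorted_id_eq_of_perm_of_pairwise _ _ hwt' (flatWeights_sorted (T.map List.length) 1).1
  by_cases he : (C.size : Int) = md
  · rw [if_pos he, if_pos (by omega)]
  · rw [if_neg he, harr0, hfold, houter, pureOut_spec md (T.map List.length) 1 C.size 0 hsum]
    by_cases hle : (C.size : Int) - md ≤ 0
    · rw [if_pos hle]
      have h0 : ((C.size : Int) - md).toNat = 0 := by omega
      simp [h0]
    · rw [if_neg hle,
        PySem.List.slice_to (PySem.List.sorted C.values fun x => x)
          (show (0 : Int) ≤ (C.size : Int) - md by omega), hsortedeq]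
      simp
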